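-- pv_equiv track=rewrite | github.com/SanoEnger/combined_ciphers | backend/ciphers/transposition.py | get_spiral_indices
-- ===== SOURCE A (Python) =====
-- def get_spiral_indices(m: int, n: int) -> list[tuple[int, int]]:
--     """
--     Порядок ячеек (строка, столбец): от центра, против часовой стрелки.
--     Для любых m×n каждая ячейка ровно один раз (как в задаче «спираль от стартовой клетки»).
--     Направления по кругу: вверх → влево → вниз → вправо.
--     """
--     if m < 1 or n < 1:
--         raise ValueError("Размеры матрицы должны быть не меньше 1×1")
--     total = m * n
--     row, col = m // 2, n // 2
--     positions: list[tuple[int, int]] = [(row, col)]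
--     if total == 1:
--         return positions
--     directions = [(-1, 0), (0, -1), (1, 0), (0, 1)]
--     dir_index = 0
--     step_len = 1
--     while len(positions) < total:
--         for _ in range(2):
--             for _ in range(step_len):
--                 row += directions[dir_index][0]
--                 col += directions[dir_index][1]
--                 if 0 <= row < m and 0 <= col < n:
--                     positions.append((row, col))
--             dir_index = (dir_index + 1) % 4
--         step_len += 1
--     return positions[:total]
-- ===== SOURCE B (Python) =====
-- def get_spiral_indices(m: int, n: int) -> list[tuple[int, int]]:
--     # Same center-out CCW spiral, but each spiral leg is clipped to the matrix
--     # arithmetically (one range per leg) instead of walking cell by cell, so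
--     # out-of-bounds runs cost O(1). After m+n rounds the walked square has side
--     # > m+n >= max(m, n), so every cell has been emitted; then truncate.
--     if m < 1 or n < 1:
--         raise ValueError("Размеры матрицы должны быть не меньше 1×1")
--     total = m * n
--     row, col = m // 2, n // 2
--     out = [(row, col)]
--     for step in range(1, m + n + 1):
--         if step % 2 == 1:
--             # up, then left
--             if 0 <= col < n:
--                 lo, hi = max(1, row - (m - 1)), min(step, row)
--                 out.extend((row - i, col) for i in range(lo, hi + 1))
--             row -= step
--             if 0 <= row < m:
--                 lo, hi = max(1, col - (n - 1)), min(step, col)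
--                 out.extend((row, col - i) for i in range(lo, hi + 1))
--             col -= step
--         else:
--             # down, then right
--             if 0 <= col < n:
--                 lo, hi = max(1, -row), min(step, m - 1 - row)
--                 out.extend((row + i, col) for i in range(lo, hi + 1))
--             row += step
--             if 0 <= row < m:
--                 lo, hi = max(1, -col), min(step, n - 1 - col)
--                 out.extend((row, col + i) for i in range(lo, hi + 1))
--             col += step
--     return out[:total]
-- ===== Notes on version B (the rewrite author's own statement) =====
-- stated objective: alternative
-- what changed: B replaces A's cell-by-cell spiral walk (which also visits every out-of-bounds cell of the growing square) by per-leg interval arithmetic: each spiral leg emits one clipped range of in-bounds cells, so out-of-bounds runs cost O(1), and the loop dispatches on step parity instead of a direction table; the asymptotic gain shows on skewed shapes (min(m,n) << max(m,n)).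
import Mathlib
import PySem

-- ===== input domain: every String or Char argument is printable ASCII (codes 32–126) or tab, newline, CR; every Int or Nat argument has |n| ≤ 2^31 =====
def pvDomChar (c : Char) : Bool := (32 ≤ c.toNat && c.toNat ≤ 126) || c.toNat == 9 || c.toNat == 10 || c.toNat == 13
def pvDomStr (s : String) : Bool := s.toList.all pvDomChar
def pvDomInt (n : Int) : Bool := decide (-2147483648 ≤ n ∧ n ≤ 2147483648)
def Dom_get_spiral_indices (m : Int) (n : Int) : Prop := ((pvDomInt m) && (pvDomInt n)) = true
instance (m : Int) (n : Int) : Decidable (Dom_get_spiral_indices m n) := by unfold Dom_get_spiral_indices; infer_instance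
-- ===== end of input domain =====

-- B replaces A's cell-by-cell spiral walk by per-leg interval clipping (each leg emits one
-- arithmetically clipped range, out-of-bounds runs cost O(1)).

-- ===== PORT A =====

-- 0 <= r < m and 0 <= c < n
def pvInb (m n r c : Int) : Bool := decide (0 ≤ r ∧ r < m ∧ 0 ≤ c ∧ c < n)

def pvDirs : List (Int × Int) := [(-1,0),(0,-1),(1,0),(0,1)]

-- inner 'for _ in range(step_len)': move one cell, append if in bounds
def pvLegA (m n dr dc : Int) : Nat → Int → Int → List (Int × Int) → Int × Int × List (Int × Int)
  | 0, row, col, pos => (row, col, pos)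
  | L+1, row, col, pos =>
      let r := row + dr
      let c := col + dc
      pvLegA m n dr dc L r c (if pvInb m n r c then pos ++ [(r, c)] else pos)

-- one body of the while loop: 'for _ in range(2)' — two legs, dir_index advancing by 1 each
def pvStepA (m n : Int) (di : Nat) (sl : Nat) (row col : Int) (pos : List (Int × Int)) :
    Int × Int × List (Int × Int) :=
  let d1 := pvDirs.getD (di % 4) (0, 0)
  let s1 := pvLegA m n d1.1 d1.2 sl row col pos
  let d2 := pvDirs.getD ((di + 1) % 4) (0, 0)
  pvLegA m n d2.1 d2.2 sl s1.1 s1.2.1 s1.2.2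

-- the while loop; fuel only makes it total (m+n iterations always reach len ≥ total,
-- and the final [:total] makes the fuel-exhaustion value identical anyway)
def pvLoopA (m n : Int) (total : Nat) : Nat → Nat → Nat → Int → Int → List (Int × Int) → List (Int × Int)
  | 0, _, _, _, _, pos => pos
  | fuel+1, di, sl, row, col, pos =>
      if pos.length < total then
        let s := pvStepA m n di sl row col pos
        pvLoopA m n total fuel ((di + 2) % 4) (sl + 1) s.1 s.2.1 s.2.2
      else pos

def get_spiral_indices (m : Int) (n : Int) : List (Int × Int) :=
  if m < 1 ∨ n < 1 then []  -- Python raises ValueError here; excluded by Pre_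
  else
    let total := (m * n).toNat
    let row := PySem.Int.floordiv m 2
    let col := PySem.Int.floordiv n 2
    let positions : List (Int × Int) := [(row, col)]
    if total = 1 then positions
    else (pvLoopA m n total ((m + n).toNat) 0 1 row col positions).take total

-- ===== PORT B =====

-- one clipped leg emission: cells g(lo), …, g(hi)
def pvRangeMap (g : Int → Int × Int) (lo hi : Int) : List (Int × Int) :=
  (PySem.List.pyRange lo (hi + 1) 1).map g

-- one round of B's for-loop: odd step = up+left, even step = down+right, each leg clipped
def pvStepB (m n : Int) (sl : Nat) (row col : Int) (pos : List (Int × Int)) :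
    Int × Int × List (Int × Int) :=
  if sl % 2 = 1 then
    let pos1 := if 0 ≤ col ∧ col < n then
        pos ++ pvRangeMap (fun i => (row - i, col)) (max 1 (row - (m - 1))) (min (sl : Int) row)
      else pos
    let row1 := row - (sl : Int)
    let pos2 := if 0 ≤ row1 ∧ row1 < m then
        pos1 ++ pvRangeMap (fun i => (row1, col - i)) (max 1 (col - (n - 1))) (min (sl : Int) col)
      else pos1
    (row1, col - (sl : Int), pos2)
  else
    let pos1 := if 0 ≤ col ∧ col < n then
        pos ++ pvRangeMap (fun i => (row + i, col)) (max 1 (-row)) (min (sl : Int) (m - 1 - row))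
      else pos
    let row1 := row + (sl : Int)
    let pos2 := if 0 ≤ row1 ∧ row1 < m then
        pos1 ++ pvRangeMap (fun i => (row1, col + i)) (max 1 (-col)) (min (sl : Int) (n - 1 - col))
      else pos1
    (row1, col + (sl : Int), pos2)

-- 'for step in range(1, m+n+1)'
def pvLoopB (m n : Int) : Nat → Nat → Int → Int → List (Int × Int) → List (Int × Int)
  | 0, _, _, _, pos => pos
  | fuel+1, sl, row, col, pos =>
      let s := pvStepB m n sl row col pos
      pvLoopB m n fuel (sl + 1) s.1 s.2.1 s.2.2

def get_spiral_indices_alt (m : Int) (n : Int) : List (Int × Int) :=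
  if m < 1 ∨ n < 1 then []  -- Python raises ValueError here; excluded by Pre_
  else
    let total := (m * n).toNat
    let row := PySem.Int.floordiv m 2
    let col := PySem.Int.floordiv n 2
    (pvLoopB m n ((m + n).toNat) 1 row col [(row, col)]).take total

-- ===== PRECONDITION & SPEC =====
-- Pre_ excludes exactly the inputs on which Python A raises ValueError (m < 1 or n < 1).
def Pre_get_spiral_indices (m : Int) (n : Int) : Prop := 1 ≤ m ∧ 1 ≤ n
instance (m : Int) (n : Int) : Decidable (Pre_get_spiral_indices m n) := by
  unfold Pre_get_spiral_indices; infer_instance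

def pvWitness_get_spiral_indices : Int × Int := (3, 4)

def Spec_get_spiral_indices (m : Int) (n : Int) (out : List (Int × Int)) : Prop :=
  out = get_spiral_indices_alt m n
instance (m : Int) (n : Int) (out : List (Int × Int)) : Decidable (Spec_get_spiral_indices m n out) := by
  unfold Spec_get_spiral_indices; infer_instance

-- ===== CLAIM (what is proved, stated in full; the proofs are below) =====
def Claim_equal_get_spiral_indices : Prop :=
  ∀ (m : Int) (n : Int), Dom_get_spiral_indices m n → Pre_get_spiral_indices m n →
    Spec_get_spiral_indices m n (get_spiral_indices m n)

-- ===== LEMMAS AND PROOFS =====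

-- A's cell-by-cell leg: final position and the filtered walk it appends
lemma pvLegA_char (m n dr dc : Int) (L : Nat) :
    ∀ (row col : Int) (pos : List (Int × Int)),
      pvLegA m n dr dc L row col pos =
        (row + (L : Int) * dr, col + (L : Int) * dc,
          pos ++ ((List.range L).map
            (fun (i : Nat) => (row + ((i : Int) + 1) * dr, col + ((i : Int) + 1) * dc))).filter
            (fun p => pvInb m n p.1 p.2)) := by
  induction L with
  | zero => intro row col pos; simp [pvLegA]
  | succ L ih =>
    intro row col pos
    have hsplit : (List.range (L + 1)).map
        (fun (i : Nat) => (row + ((i : Int) + 1) * dr, col + ((i : Int) + 1) * dc)) =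
        (row + dr, col + dc) ::
          (List.range L).map
            (fun (i : Nat) => (row + dr + ((i : Int) + 1) * dr, col + dc + ((i : Int) + 1) * dc)) := by
      rw [List.range_succ_eq_map, List.map_cons, List.map_map]
      congr 1
      · rw [Prod.mk.injEq]; constructor <;> push_cast <;> ring
      · apply List.map_congr_left
        intro i _
        simp only [Function.comp_apply]
        rw [Prod.mk.injEq]
        constructor <;> push_cast <;> ring
    rw [pvLegA, ih, hsplit, List.filter_cons]
    rw [Prod.mk.injEq, Prod.mk.injEq]
    refine ⟨by push_cast; ring, by push_cast; ring, ?_⟩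
    dsimp only
    by_cases hb : pvInb m n (row + dr) (col + dc)
    · rw [if_pos hb, if_pos hb]
      simp [List.append_assoc]
    · rw [if_neg hb, if_neg (by simpa using hb)]

-- value list 1..L filtered by an interval is a range
lemma pvFilterRange (L : Nat) (lo hi : Int) :
    ((List.range L).filter
        (fun (i : Nat) => decide (lo ≤ (i : Int) + 1 ∧ (i : Int) + 1 ≤ hi))).map
        (fun (i : Nat) => (i : Int) + 1) =
      PySem.List.pyRange (max 1 lo) (min (L : Int) hi + 1) 1 := by
  induction L with
  | zero =>
    rw [PySem.List.pyRange_one_eq_nil (by omega)]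
    simp
  | succ L ih =>
    rw [List.range_succ, List.filter_append, List.map_append, ih]
    by_cases hmem : lo ≤ (L : Int) + 1 ∧ (L : Int) + 1 ≤ hi
    · have hf : List.filter
          (fun (i : Nat) => decide (lo ≤ (i : Int) + 1 ∧ (i : Int) + 1 ≤ hi)) [L] = [L] := by
        simp only [List.filter_cons, List.filter_nil]
        rw [if_pos (by simpa using hmem)]
      rw [hf]
      have h1 : min ((L : Int) + 1) hi = (L : Int) + 1 := by omega
      have h2 : min (L : Int) hi = (L : Int) := by omega
      push_cast
      rw [h1, h2]
      simp only [List.map_cons, List.map_nil]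
      exact (PySem.List.pyRange_one_succ_right (by omega)).symm
    · have hf : List.filter
          (fun (i : Nat) => decide (lo ≤ (i : Int) + 1 ∧ (i : Int) + 1 ≤ hi)) [L] = [] := by
        simp only [List.filter_cons, List.filter_nil]
        rw [if_neg (by simpa using hmem)]
      rw [hf]
      simp only [List.map_nil, List.append_nil]
      by_cases hh : hi ≤ (L : Int)
      · have : min ((L : Int) + 1) hi = min (L : Int) hi := by omega
        push_cast
        rw [this]
      · rw [PySem.List.pyRange_one_eq_nil (by omega),
          PySem.List.pyRange_one_eq_nil (by push_cast; omega)]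

-- A's filtered walk along one leg is B's clipped range
lemma pvFilterWalk (m n dr dc row col : Int) (L : Nat) (lo hi : Int)
    (h : ∀ j : Int, 1 ≤ j → j ≤ (L : Int) →
      pvInb m n (row + j * dr) (col + j * dc) = decide (lo ≤ j ∧ j ≤ hi)) :
    ((List.range L).map
        (fun (i : Nat) => (row + ((i : Int) + 1) * dr, col + ((i : Int) + 1) * dc))).filter
        (fun p => pvInb m n p.1 p.2) =
      (PySem.List.pyRange (max 1 lo) (min (L : Int) hi + 1) 1).map
        (fun j => (row + j * dr, col + j * dc)) := by
  rw [List.filter_map]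
  have hcong : (List.range L).filter
        ((fun p : Int × Int => pvInb m n p.1 p.2) ∘
          (fun (i : Nat) => (row + ((i : Int) + 1) * dr, col + ((i : Int) + 1) * dc))) =
      (List.range L).filter
        (fun (i : Nat) => decide (lo ≤ (i : Int) + 1 ∧ (i : Int) + 1 ≤ hi)) := by
    apply List.filter_congr
    intro i hi'
    have hiL : i < L := List.mem_range.mp hi'
    exact h ((i : Int) + 1) (by omega) (by omega)
  rw [hcong, ← pvFilterRange L lo hi, List.map_map]
  rfl

-- one clipped leg, in the four direction variants B computes
lemma pvLegA_up (m n : Int) (L : Nat) (row col : Int) (pos : List (Int × Int)) :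
    pvLegA m n (-1) 0 L row col pos =
      (row - (L : Int), col,
        if 0 ≤ col ∧ col < n then
          pos ++ pvRangeMap (fun i => (row - i, col)) (max 1 (row - (m - 1))) (min (L : Int) row)
        else pos) := by
  rw [pvLegA_char]
  rw [Prod.mk.injEq, Prod.mk.injEq]
  refine ⟨by ring, by ring, ?_⟩
  by_cases hc : 0 ≤ col ∧ col < n
  · rw [if_pos hc,
      pvFilterWalk m n (-1) 0 row col L (row - (m - 1)) row
        (by intro j h1 h2; simp only [pvInb, mul_neg_one, mul_zero, add_zero]
            rw [decide_eq_decide]; omega)]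
    simp only [pvRangeMap]
    congr 1
    apply List.map_congr_left
    intro j _
    rw [Prod.mk.injEq]
    constructor <;> ring
  · rw [if_neg hc,
      pvFilterWalk m n (-1) 0 row col L 1 0
        (by intro j h1 h2; simp only [pvInb, mul_neg_one, mul_zero, add_zero]
            rw [decide_eq_decide]; omega)]
    rw [PySem.List.pyRange_one_eq_nil (by omega)]
    simp

lemma pvLegA_left (m n : Int) (L : Nat) (row col : Int) (pos : List (Int × Int)) :
    pvLegA m n 0 (-1) L row col pos =
      (row, col - (L : Int),
        if 0 ≤ row ∧ row < m then
          pos ++ pvRangeMap (fun i => (row, col - i)) (max 1 (col - (n - 1))) (min (L : Int) col)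
        else pos) := by
  rw [pvLegA_char]
  rw [Prod.mk.injEq, Prod.mk.injEq]
  refine ⟨by ring, by ring, ?_⟩
  by_cases hc : 0 ≤ row ∧ row < m
  · rw [if_pos hc,
      pvFilterWalk m n 0 (-1) row col L (col - (n - 1)) col
        (by intro j h1 h2; simp only [pvInb, mul_neg_one, mul_zero, add_zero]
            rw [decide_eq_decide]; omega)]
    simp only [pvRangeMap]
    congr 1
    apply List.map_congr_left
    intro j _
    rw [Prod.mk.injEq]
    constructor <;> ring
  · rw [if_neg hc,
      pvFilterWalk m n 0 (-1) row col L 1 0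
        (by intro j h1 h2; simp only [pvInb, mul_neg_one, mul_zero, add_zero]
            rw [decide_eq_decide]; omega)]
    rw [PySem.List.pyRange_one_eq_nil (by omega)]
    simp

lemma pvLegA_down (m n : Int) (L : Nat) (row col : Int) (pos : List (Int × Int)) :
    pvLegA m n 1 0 L row col pos =
      (row + (L : Int), col,
        if 0 ≤ col ∧ col < n then
          pos ++ pvRangeMap (fun i => (row + i, col)) (max 1 (-row)) (min (L : Int) (m - 1 - row))
        else pos) := by
  rw [pvLegA_char]
  rw [Prod.mk.injEq, Prod.mk.injEq]
  refine ⟨by ring, by ring, ?_⟩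
  by_cases hc : 0 ≤ col ∧ col < n
  · rw [if_pos hc,
      pvFilterWalk m n 1 0 row col L (-row) (m - 1 - row)
        (by intro j h1 h2; simp only [pvInb, mul_one, mul_zero, add_zero]
            rw [decide_eq_decide]; omega)]
    simp only [pvRangeMap]
    congr 1
    apply List.map_congr_left
    intro j _
    rw [Prod.mk.injEq]
    constructor <;> ring
  · rw [if_neg hc,
      pvFilterWalk m n 1 0 row col L 1 0
        (by intro j h1 h2; simp only [pvInb, mul_one, mul_zero, add_zero]
            rw [decide_eq_decide]; omega)]
    rw [PySem.List.pyRange_one_eq_nil (by omega)]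
    simp

lemma pvLegA_right (m n : Int) (L : Nat) (row col : Int) (pos : List (Int × Int)) :
    pvLegA m n 0 1 L row col pos =
      (row, col + (L : Int),
        if 0 ≤ row ∧ row < m then
          pos ++ pvRangeMap (fun i => (row, col + i)) (max 1 (-col)) (min (L : Int) (n - 1 - col))
        else pos) := by
  rw [pvLegA_char]
  rw [Prod.mk.injEq, Prod.mk.injEq]
  refine ⟨by ring, by ring, ?_⟩
  by_cases hc : 0 ≤ row ∧ row < m
  · rw [if_pos hc,
      pvFilterWalk m n 0 1 row col L (-col) (n - 1 - col)
        (by intro j h1 h2; simp only [pvInb, mul_one, mul_zero, add_zero]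
            rw [decide_eq_decide]; omega)]
    simp only [pvRangeMap]
    congr 1
    apply List.map_congr_left
    intro j _
    rw [Prod.mk.injEq]
    constructor <;> ring
  · rw [if_neg hc,
      pvFilterWalk m n 0 1 row col L 1 0
        (by intro j h1 h2; simp only [pvInb, mul_one, mul_zero, add_zero]
            rw [decide_eq_decide]; omega)]
    rw [PySem.List.pyRange_one_eq_nil (by omega)]
    simp

-- one round of A equals one round of B (dir_index 0 on odd steps, 2 on even steps)
lemma pvStep_eq (m n : Int) (sl : Nat) (row col : Int) (pos : List (Int × Int)) :
    pvStepA m n (if sl % 2 = 1 then 0 else 2) sl row col pos = pvStepB m n sl row col pos := by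
  by_cases hp : sl % 2 = 1
  · rw [if_pos hp]
    have hA : pvStepA m n 0 sl row col pos =
        (fun s : Int × Int × List (Int × Int) => pvLegA m n 0 (-1) sl s.1 s.2.1 s.2.2)
          (pvLegA m n (-1) 0 sl row col pos) := rfl
    rw [hA, pvLegA_up]
    dsimp only
    rw [pvLegA_left]
    simp only [pvStepB, if_pos hp]
  · rw [if_neg hp]
    have hA : pvStepA m n 2 sl row col pos =
        (fun s : Int × Int × List (Int × Int) => pvLegA m n 0 1 sl s.1 s.2.1 s.2.2)
          (pvLegA m n 1 0 sl row col pos) := rfl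
    rw [hA, pvLegA_down]
    dsimp only
    rw [pvLegA_right]
    simp only [pvStepB, if_neg hp]

lemma pvStepB_prefix (m n : Int) (sl : Nat) (row col : Int) (pos : List (Int × Int)) :
    pos <+: (pvStepB m n sl row col pos).2.2 := by
  simp only [pvStepB]
  split_ifs <;> simp [List.append_assoc, List.prefix_append]

lemma pvLoopB_prefix (m n : Int) (fuel : Nat) :
    ∀ (sl : Nat) (row col : Int) (pos : List (Int × Int)),
      pos <+: pvLoopB m n fuel sl row col pos := by
  induction fuel with
  | zero => intro sl row col pos; simp [pvLoopB]
  | succ fuel ih =>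
    intro sl row col pos
    rw [pvLoopB]
    exact (pvStepB_prefix m n sl row col pos).trans (ih _ _ _ _)

lemma pvLoop_eq (m n : Int) (total : Nat) (fuel : Nat) :
    ∀ (sl : Nat) (row col : Int) (pos : List (Int × Int)),
      (pvLoopA m n total fuel (if sl % 2 = 1 then 0 else 2) sl row col pos).take total =
        (pvLoopB m n fuel sl row col pos).take total := by
  induction fuel with
  | zero => intro sl row col pos; simp [pvLoopA, pvLoopB]
  | succ fuel ih =>
    intro sl row col pos
    rw [pvLoopA, pvLoopB]
    by_cases hl : pos.length < total
    · rw [if_pos hl]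
      dsimp only
      rw [pvStep_eq]
      have hdi : ((if sl % 2 = 1 then 0 else 2) + 2) % 4 =
          (if (sl + 1) % 2 = 1 then 0 else 2 : Nat) := by
        by_cases h2 : sl % 2 = 1 <;> simp [h2] <;> omega
      rw [hdi]
      exact ih _ _ _ _
    · rw [if_neg hl]
      obtain ⟨t, ht⟩ := (pvStepB_prefix m n sl row col pos).trans
        (pvLoopB_prefix m n fuel (sl + 1) (pvStepB m n sl row col pos).1
          (pvStepB m n sl row col pos).2.1 (pvStepB m n sl row col pos).2.2)
      rw [← ht, List.take_append_of_le_length (by omega)]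

-- ===== VERDICT (by name: the statement is the Claim_ definition above) =====
theorem get_spiral_indices_spec : Claim_equal_get_spiral_indices := by
  unfold Claim_equal_get_spiral_indices
  intro m n hdom hpre
  obtain ⟨hm, hn⟩ := hpre
  unfold Spec_get_spiral_indices get_spiral_indices get_spiral_indices_alt
  rw [if_neg (by omega : ¬(m < 1 ∨ n < 1)), if_neg (by omega : ¬(m < 1 ∨ n < 1))]
  dsimp only
  by_cases htot : (m * n).toNat = 1
  · obtain ⟨t, ht⟩ := pvLoopB_prefix m n ((m + n).toNat) 1
      (PySem.Int.floordiv m 2) (PySem.Int.floordiv n 2)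
      [(PySem.Int.floordiv m 2, PySem.Int.floordiv n 2)]
    rw [if_pos htot, htot, ← ht, List.take_append_of_le_length (by simp)]
    simp
  · rw [if_neg htot]
    have h := pvLoop_eq m n ((m * n).toNat) ((m + n).toNat) 1
      (PySem.Int.floordiv m 2) (PySem.Int.floordiv n 2)
      [(PySem.Int.floordiv m 2, PySem.Int.floordiv n 2)]
    simpa using h
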